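-- pv_equiv track=rewrite | github.com/pdurlej/ia-presenter-know-how | skills/ia-presenter-deck/scripts/presentation_system.py | split_slides
-- ===== SOURCE A (Python) =====
-- def split_slides(text: str) -> list[list[str]]:
--     slides: list[list[str]] = []
--     current: list[str] = []
--     for line in text.splitlines():
--         if line.strip() == "---":
--             slides.append(current)
--             current = []
--         else:
--             current.append(line)
--     slides.append(current)
--     return slides
-- ===== SOURCE B (Python) =====
-- def split_slides(text: str) -> list[list[str]]:
--     lines = text.splitlines()
--     seps = [i for i, line in enumerate(lines) if line.strip() == "---"]
--     groups = []
--     start = 0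
--     for p in seps:
--         groups.append(lines[start:p])
--         start = p + 1
--     groups.append(lines[start:])
--     return groups
-- ===== Notes on version B (the rewrite author's own statement) =====
-- stated objective: alternative
-- what changed: Instead of one accumulator loop that grows the current slide line by line, B collects the indices of separator lines once and then builds each group as a slice of the line list between consecutive separator positions.
import Mathlib
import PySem

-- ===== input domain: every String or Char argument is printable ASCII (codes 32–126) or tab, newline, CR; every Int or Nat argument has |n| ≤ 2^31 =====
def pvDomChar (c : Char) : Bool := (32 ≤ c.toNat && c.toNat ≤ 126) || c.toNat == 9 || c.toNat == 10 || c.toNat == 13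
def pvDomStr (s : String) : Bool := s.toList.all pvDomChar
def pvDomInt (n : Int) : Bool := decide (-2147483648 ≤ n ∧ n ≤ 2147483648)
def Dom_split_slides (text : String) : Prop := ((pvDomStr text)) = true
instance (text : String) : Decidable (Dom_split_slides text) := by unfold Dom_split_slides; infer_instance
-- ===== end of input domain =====

-- B replaces A's line-by-line accumulator loop by collecting separator indices once and
-- slicing the line list between consecutive separator positions (alternative decomposition).

-- ===== PORT A =====
def split_slides (text : String) : List (List String) :=
  let r := (PySem.Str.splitlines text).foldl
    (fun (st : List (List String) × List String) line =>
      if PySem.Str.strip line == "---" then (st.1 ++ [st.2], [])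
      else (st.1, st.2 ++ [line]))
    ([], [])
  r.1 ++ [r.2]

-- ===== PORT B =====
def split_slides_alt (text : String) : List (List String) :=
  let lines := PySem.Str.splitlines text
  let seps := ((PySem.List.enumerate lines 0).filter
      (fun p => PySem.Str.strip p.2 == "---")).map Prod.fst
  let r := seps.foldl
    (fun (st : List (List String) × Int) p =>
      (st.1 ++ [PySem.List.slice lines (some st.2) (some p)], p + 1))
    ([], (0 : Int))
  r.1 ++ [PySem.List.slice lines (some r.2) none]

-- ===== PRECONDITION & SPEC =====
def Spec_split_slides (text : String) (out : List (List String)) : Prop := out = split_slides_alt text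
instance (text : String) (out : List (List String)) : Decidable (Spec_split_slides text out) := by unfold Spec_split_slides; infer_instance

-- ===== CLAIM (what is proved, stated in full; the proofs are below) =====
def Claim_equal_split_slides : Prop := ∀ (text : String), Dom_split_slides text → Spec_split_slides text (split_slides text)

-- ===== LEMMAS AND PROOFS =====

-- prepend `c` onto the first group (both programs' results are nonempty group lists)
def consH (c : List String) : List (List String) → List (List String)
  | [] => [c]
  | g :: gs => (c ++ g) :: gs

-- reference: the group list of a line list
def goB : List String → List (List String)
  | [] => [[]]
  | l :: ls => if PySem.Str.strip l == "---" then [] :: goB ls else consH [l] (goB ls)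

lemma goB_ne_nil (ls : List String) : goB ls ≠ [] := by
  cases ls with
  | nil => simp [goB]
  | cons l ls => unfold goB; split; · simp
                 · cases goB ls <;> simp [consH]

lemma foldA (ls : List String) : ∀ (slides : List (List String)) (current : List String),
    (ls.foldl
        (fun (st : List (List String) × List String) line =>
          if PySem.Str.strip line == "---" then (st.1 ++ [st.2], [])
          else (st.1, st.2 ++ [line]))
        (slides, current)).1
      ++ [(ls.foldl
        (fun (st : List (List String) × List String) line =>
          if PySem.Str.strip line == "---" then (st.1 ++ [st.2], [])
          else (st.1, st.2 ++ [line]))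
        (slides, current)).2]
      = slides ++ consH current (goB ls) := by
  induction ls with
  | nil => intro slides current; simp [goB, consH]
  | cons l ls ih =>
    intro slides current
    cases hg : goB ls with
    | nil => exact absurd hg (goB_ne_nil ls)
    | cons g gs =>
      by_cases h : (PySem.Str.strip l == "---") = true
      · rw [List.foldl_cons, if_pos h, ih]
        simp [goB, h, hg, consH]
      · rw [List.foldl_cons, if_neg h, ih]
        simp [goB, h, hg, consH]

lemma foldB (L : List String) (ls : List String) : ∀ (s k : Nat) (acc : List (List String)),
    s ≤ k → L.drop k = ls →
    ((((PySem.List.enumerate ls (k : Int)).filter (fun p => PySem.Str.strip p.2 == "---")).map Prod.fst).foldl (fun (st : List (List String) × Int) p => (st.1 ++ [PySem.List.slice L (some st.2) (some p)], p + 1)) (acc, (s : Int))).1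
      ++ [PySem.List.slice L (some ((((PySem.List.enumerate ls (k : Int)).filter (fun p => PySem.Str.strip p.2 == "---")).map Prod.fst).foldl (fun (st : List (List String) × Int) p => (st.1 ++ [PySem.List.slice L (some st.2) (some p)], p + 1)) (acc, (s : Int))).2) none]
      = acc ++ consH ((L.drop s).take (k - s)) (goB ls) := by
  induction ls with
  | nil =>
    intro s k acc hsk hdrop
    have hlen : L.length ≤ k := by
      have := congrArg List.length hdrop; simp at this; omega
    have htake : (L.drop s).take (k - s) = L.drop s :=
      List.take_of_length_le (by simp; omega)
    simp [PySem.List.enumerate, goB, consH, htake, PySem.List.slice_from_natCast]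
  | cons l ls ih =>
    intro s k acc hsk hdrop
    have hdropk1 : L.drop (k + 1) = ls := by
      have h1 : L.drop (k + 1) = (L.drop k).drop 1 := by rw [List.drop_drop]
      rw [h1, hdrop]; rfl
    have hgetk : L[k]? = some l := by
      have h0 : (L.drop k)[0]? = L[k + 0]? := List.getElem?_drop
      simpa [hdrop] using h0.symm
    have hcast : ((k : Int) + 1) = ((k + 1 : Nat) : Int) := by push_cast; ring
    rw [PySem.List.enumerate_cons]
    cases hg : goB ls with
    | nil => exact absurd hg (goB_ne_nil ls)
    | cons g gs =>
      by_cases h : (PySem.Str.strip l == "---") = true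
      · -- separator line at index k
        have ih' := ih (k + 1) (k + 1)
          (acc ++ [PySem.List.slice L (some (s : Int)) (some (k : Int))]) (le_refl _) hdropk1
        simp only [List.filter_cons, h, if_pos, List.map_cons, List.foldl_cons, hcast]
        rw [ih']
        simp [goB, h, hg, consH, PySem.List.slice_natCast]
      · -- ordinary line at index k
        have ih' := ih s (k + 1) acc (by omega) hdropk1
        simp only [List.filter_cons, h, Bool.false_eq_true, if_false, hcast]
        rw [ih']
        have htake : (L.drop s).take (k + 1 - s) = (L.drop s).take (k - s) ++ [l] := by
          have hk : k + 1 - s = (k - s) + 1 := by omega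
          rw [hk, List.take_add_one]
          have hget : (L.drop s)[k - s]? = some l := by
            rw [List.getElem?_drop]
            have hsk2 : s + (k - s) = k := by omega
            rw [hsk2, hgetk]
          simp [hget]
        rw [htake]
        simp [goB, h, hg, consH]

-- ===== VERDICT (by name: the statement is the Claim_ definition above) =====
theorem split_slides_spec : Claim_equal_split_slides := by
  intro text _
  unfold Spec_split_slides
  simp only [split_slides, split_slides_alt]
  rw [foldA]
  have hB := foldB (PySem.Str.splitlines text) (PySem.Str.splitlines text) 0 0 [] (le_refl 0) (by simp)
  simp only [Nat.cast_zero] at hB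
  rw [hB]
  simp
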